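-- pv_equiv track=rewrite | github.com/bansal-neeraj/ds_algos | hackerrank.py | add_radio
-- ===== SOURCE A (Python) =====
-- def add_radio(arr,k,c):
--
--     if len(arr) == 0:
--         return c
--     if len(arr) < k +1:
--         return c+1 if any(arr) else c
--
--     if arr[k]:
--         c += 1
--         return add_radio(arr[k+k+1:], k, c)
--     else:
--         sub_arr = arr[:k]
--         for j in range(len(sub_arr)-1,-1,-1):
--             if sub_arr[j]:
--                 c += 1
--                 break
--         return add_radio(arr[j+k+1:],k,c)
-- ===== SOURCE B (Python) =====
-- def _last_house(arr, lo, hi):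
--     # rightmost index j in [lo, hi] with arr[j] nonzero, else None
--     j = hi
--     while j >= lo:
--         if arr[j]:
--             return j
--         j -= 1
--     return None
--
-- def add_radio(arr, k, c):
--     n = len(arr)
--     i = 0
--     while i < n and n - i >= k + 1:
--         j = _last_house(arr, i, i + k)
--         if j is None:
--             i += k + 1
--         else:
--             c += 1
--             i = j + k + 1
--     if any(arr[i:]):
--         c += 1
--     return c
-- ===== Notes on version B (the rewrite author's own statement) =====
-- stated objective: alternative
-- what changed: Replaced A's recursion on freshly-sliced list copies with a single iterative forward pass that moves an index pointer over the original array (window scan via indices, tail handled once after the loop); avoids per-step slice copies, though a timing run read only ~1.3x at the largest size.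
import Mathlib
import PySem

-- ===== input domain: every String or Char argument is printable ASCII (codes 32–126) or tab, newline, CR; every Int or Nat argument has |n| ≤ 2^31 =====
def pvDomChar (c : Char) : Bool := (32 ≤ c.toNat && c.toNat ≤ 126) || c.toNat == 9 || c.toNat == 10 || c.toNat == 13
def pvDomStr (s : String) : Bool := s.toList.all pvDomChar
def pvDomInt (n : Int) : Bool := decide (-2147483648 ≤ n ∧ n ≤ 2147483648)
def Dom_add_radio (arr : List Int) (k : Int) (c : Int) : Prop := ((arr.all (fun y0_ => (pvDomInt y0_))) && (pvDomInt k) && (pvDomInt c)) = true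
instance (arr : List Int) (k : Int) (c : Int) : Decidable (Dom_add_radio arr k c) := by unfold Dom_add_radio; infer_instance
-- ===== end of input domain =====

-- B replaces A's recursive slicing with a single forward index-pointer pass over the same greedy rule: no per-step list copies.


-- ===== PORT A =====
-- A's backward for-loop over sub_arr ('for j in range(len(sub_arr)-1,-1,-1): if sub_arr[j]: break'):
-- index of the rightmost nonzero element, none if there is none.
def lastNZ : List Int → Option Nat
  | [] => none
  | x :: xs =>
    match lastNZ xs with
    | some j => some (j + 1)
    | none => if x ≠ 0 then some 0 else none

-- A's recursion, with fuel making the structural recursion total (len+1 suffices on Pre_;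
-- outside Pre_ Python raises or recurses forever).
def addRadioGo : Nat → List Int → Int → Int → Int
  | 0, _, _, c => c
  | fuel + 1, arr, k, c =>
    if arr.length = 0 then c
    else if (arr.length : Int) < k + 1 then (if arr.any (fun x => decide (x ≠ 0)) then c + 1 else c)
    else if PySem.List.pyGetD arr k 0 ≠ 0 then  -- arr[k]; in range on Pre_ (default unreached)
      addRadioGo fuel (PySem.List.slice arr (some (k + k + 1)) none) k (c + 1)
    else
      match lastNZ (PySem.List.slice arr none (some k)) with
      | some j => addRadioGo fuel (PySem.List.slice arr (some ((j : Int) + k + 1)) none) k (c + 1)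
      | none =>
        if (PySem.List.slice arr none (some k)).length ≠ 0 then
          -- loop ran without a break: j = 0 and no increment
          addRadioGo fuel (PySem.List.slice arr (some (0 + k + 1)) none) k c
        else c  -- Python: UnboundLocalError (sub_arr empty, j never bound); outside Pre_

def add_radio (arr : List Int) (k : Int) (c : Int) : Int :=
  addRadioGo (arr.length + 1) arr k c

-- ===== PORT B =====
-- Source B's _last_house: scan j from hi down to lo, first index with arr[j] nonzero.
def lastHouse (arr : List Int) (lo hi : Int) : Option Int :=
  if hi < lo then none
  else if PySem.List.pyGetD arr hi 0 ≠ 0 then some hi  -- arr[j]; in range at every call site on Pre_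
  else lastHouse arr lo (hi - 1)
termination_by (hi - lo + 1).toNat
decreasing_by omega

-- Source B's while loop, with fuel (len+1 iterations suffice: i advances by ≥ 1 while i < n).
def altGo (arr : List Int) (k : Int) : Nat → Int → Int → Int
  | 0, _, c => c
  | fuel + 1, i, c =>
    if i < (arr.length : Int) ∧ (arr.length : Int) - i ≥ k + 1 then
      match lastHouse arr i (i + k) with
      | none => altGo arr k fuel (i + k + 1) c
      | some j => altGo arr k fuel (j + k + 1) (c + 1)
    else if (PySem.List.slice arr (some i) none).any (fun x => decide (x ≠ 0)) then c + 1 else c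

def add_radio_alt (arr : List Int) (k : Int) (c : Int) : Int :=
  altGo arr k (arr.length + 1) 0 c

-- ===== PRECONDITION & SPEC =====
-- Pre_ excludes exactly the inputs on which Python A does not return: for nonempty arr with k ≤ 0 it
-- raises (UnboundLocalError / IndexError) or recurses forever, except k = 0 with every entry nonzero.
def Pre_add_radio (arr : List Int) (k : Int) (c : Int) : Prop :=
  arr = [] ∨ 1 ≤ k ∨ (k = 0 ∧ ∀ x ∈ arr, x ≠ 0)
instance (arr : List Int) (k : Int) (c : Int) : Decidable (Pre_add_radio arr k c) := by
  unfold Pre_add_radio; infer_instance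

def pvWitness_add_radio : List Int × Int × Int := ([1, 0, 0, 1, 0], 2, 0)

def Spec_add_radio (arr : List Int) (k : Int) (c : Int) (out : Int) : Prop := out = add_radio_alt arr k c
instance (arr : List Int) (k : Int) (c : Int) (out : Int) : Decidable (Spec_add_radio arr k c out) := by
  unfold Spec_add_radio; infer_instance

-- ===== CLAIM (what is proved, stated in full; the proofs are below) =====
def Claim_equal_add_radio : Prop := ∀ (arr : List Int) (k : Int) (c : Int), Dom_add_radio arr k c → Pre_add_radio arr k c → Spec_add_radio arr k c (add_radio arr k c)

-- ===== LEMMAS AND PROOFS =====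

theorem lastNZ_append_singleton (xs : List Int) (x : Int) :
    lastNZ (xs ++ [x]) = if x ≠ 0 then some xs.length else lastNZ xs := by
  induction xs with
  | nil => simp [lastNZ]
  | cons a as ih =>
    simp only [List.cons_append, lastNZ, ih]
    by_cases hx : x ≠ 0 <;> simp [hx]

theorem lastHouse_eq_lastNZ (arr : List Int) (i : Nat) :
    ∀ t : Nat, i + t ≤ arr.length →
      lastHouse arr (i : Int) ((i : Int) + (t : Int) - 1) =
        (lastNZ ((arr.drop i).take t)).map (fun j => ((i : Int) + (j : Int))) := by
  intro t
  induction t with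
  | zero =>
    intro _
    rw [lastHouse]
    simp [lastNZ]
  | succ t ih =>
    intro h
    have hlt : i + t < arr.length := by omega
    have htake : (arr.drop i).take (t + 1) = (arr.drop i).take t ++ [arr[i + t]] := by
      rw [List.take_add_one]
      have : (arr.drop i)[t]? = some arr[i + t] := by
        rw [List.getElem?_drop]
        exact List.getElem?_eq_getElem hlt
      simp [this]
    rw [htake, lastNZ_append_singleton]
    have hlen : ((arr.drop i).take t).length = t := by simp; omega
    rw [lastHouse]
    have hhi : ¬ ((i : Int) + ((t + 1 : Nat) : Int) - 1 < (i : Int)) := by push_cast; omega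
    have hget : PySem.List.pyGetD arr ((i : Int) + ((t + 1 : Nat) : Int) - 1) 0 = arr[i + t] := by
      have e : ((i : Int) + ((t + 1 : Nat) : Int) - 1) = ((i + t : Nat) : Int) := by push_cast; ring
      rw [e, PySem.List.pyGetD_natCast]
      exact List.getD_eq_getElem _ _ hlt
    rw [if_neg hhi, hget]
    by_cases hx : arr[i + t] ≠ 0
    · rw [if_pos hx, if_pos hx, hlen]
      simp
      push_cast
      ring
    · rw [if_neg hx, if_neg hx]
      have e2 : (i : Int) + ((t + 1 : Nat) : Int) - 1 - 1 = (i : Int) + ((t : Nat) : Int) - 1 := by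
        push_cast; ring
      rw [e2, ih (by omega)]

theorem main_loop : ∀ (m : Nat) (arr : List Int) (k c : Int) (i fa fb : Nat),
    0 ≤ k → (k = 0 → ∀ x ∈ arr, x ≠ 0) →
    m = arr.length - i → arr.length - i < fa → arr.length - i < fb →
    addRadioGo fa (arr.drop i) k c = altGo arr k fb (i : Int) c := by
  intro m
  induction m using Nat.strong_induction_on with
  | _ m ih =>
  intro arr k c i fa fb hk hz hm hfa hfb
  cases fa with
  | zero => omega
  | succ fa =>
  cases fb with
  | zero => omega
  | succ fb =>
  simp only [addRadioGo, altGo]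
  rw [PySem.List.slice_from_natCast]
  by_cases hi : arr.length ≤ i
  · -- drop i = [], both return c
    have hdnil : arr.drop i = [] := by simp [List.drop_eq_nil_iff]; omega
    rw [hdnil]
    rw [if_pos (show ([] : List Int).length = 0 from rfl),
        if_neg (show ¬ ((i : Int) < (arr.length : Int) ∧ (arr.length : Int) - i ≥ k + 1) by omega)]
    rfl
  · push_neg at hi
    have hdlen : (arr.drop i).length = arr.length - i := List.length_drop ..
    have hdlenI : ((arr.drop i).length : Int) = (arr.length : Int) - (i : Int) := by
      rw [hdlen]; omega
    rw [if_neg (by omega)]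
    by_cases hsmall : ((arr.drop i).length : Int) < k + 1
    · have hs' : (arr.length : Int) - (i : Int) < k + 1 := by omega
      rw [if_pos hsmall, if_neg (show ¬ ((i : Int) < (arr.length : Int) ∧ (arr.length : Int) - i ≥ k + 1) by omega)]
    · have hs' : (arr.length : Int) - (i : Int) ≥ k + 1 := by omega
      rw [if_neg hsmall,
          if_pos (show (i : Int) < (arr.length : Int) ∧ (arr.length : Int) - i ≥ k + 1 by constructor <;> omega)]
      obtain ⟨K, rfl⟩ : ∃ K : Nat, k = (K : Int) := ⟨k.toNat, (Int.toNat_of_nonneg hk).symm⟩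
      have hKlt : i + K < arr.length := by omega
      have hKd : K < (arr.drop i).length := by omega
      have hgetA : PySem.List.pyGetD (arr.drop i) (K : Int) 0 = arr[i + K] := by
        rw [PySem.List.pyGetD_natCast, List.getD_eq_getElem _ _ hKd]
        simp [List.getElem_drop]
      have hbr : lastHouse arr (i : Int) ((i : Int) + (K : Int)) =
          (lastNZ ((arr.drop i).take (K + 1))).map (fun j => ((i : Int) + (j : Int))) := by
        have h := lastHouse_eq_lastNZ arr i (K + 1) (by omega)
        have e : (i : Int) + ((K + 1 : Nat) : Int) - 1 = (i : Int) + (K : Int) := by push_cast; ring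
        rwa [e] at h
      have htake : (arr.drop i).take (K + 1) = (arr.drop i).take K ++ [arr[i + K]] := by
        rw [List.take_add_one]
        have h : (arr.drop i)[K]? = some arr[i + K] := by
          rw [List.getElem?_drop]
          exact List.getElem?_eq_getElem hKlt
        simp [h]
      have hsub : PySem.List.slice (arr.drop i) none (some (K : Int)) = (arr.drop i).take K :=
        PySem.List.slice_to_natCast ..
      have hsublen : ((arr.drop i).take K).length = K := by simp; omega
      rw [htake, lastNZ_append_singleton, hsublen] at hbr
      rw [hgetA, hsub, hbr]
      by_cases hx : arr[i + K] ≠ 0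
      · rw [if_pos hx, if_pos hx]
        show addRadioGo fa (PySem.List.slice (arr.drop i) (some ((K : Int) + K + 1)) none) (K : Int) (c + 1) =
          altGo arr (K : Int) fb ((i : Int) + (K : Int) + (K : Int) + 1) (c + 1)
        have eA : PySem.List.slice (arr.drop i) (some ((K : Int) + K + 1)) none =
            arr.drop (i + (2 * K + 1)) := by
          have e : (K : Int) + K + 1 = ((2 * K + 1 : Nat) : Int) := by push_cast; ring
          rw [e, PySem.List.slice_from_natCast, List.drop_drop]
        have eB : (i : Int) + (K : Int) + (K : Int) + 1 = ((i + (2 * K + 1) : Nat) : Int) := by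
          push_cast; ring
        rw [eA, eB]
        exact ih _ (by omega) arr _ _ _ _ _ hk hz rfl (by omega) (by omega)
      · rw [if_neg hx, if_neg hx]
        push_neg at hx
        cases hnz : lastNZ ((arr.drop i).take K) with
        | some j =>
          show addRadioGo fa (PySem.List.slice (arr.drop i) (some ((j : Int) + K + 1)) none) (K : Int) (c + 1) =
            altGo arr (K : Int) fb ((i : Int) + (j : Int) + (K : Int) + 1) (c + 1)
          have eA : PySem.List.slice (arr.drop i) (some ((j : Int) + K + 1)) none =
              arr.drop (i + (j + K + 1)) := by
            have e : (j : Int) + (K : Int) + 1 = ((j + K + 1 : Nat) : Int) := by push_cast; ring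
            rw [e, PySem.List.slice_from_natCast, List.drop_drop]
          have eB : (i : Int) + (j : Int) + (K : Int) + 1 = ((i + (j + K + 1) : Nat) : Int) := by
            push_cast; ring
          rw [eA, eB]
          exact ih _ (by omega) arr _ _ _ _ _ hk hz rfl (by omega) (by omega)
        | none =>
          have hK1 : 1 ≤ K := by
            rcases Nat.eq_zero_or_pos K with h0 | h
            · exfalso
              have hK0 : (K : Int) = 0 := by exact_mod_cast h0
              exact hz hK0 arr[i + K] (List.getElem_mem hKlt) hx
            · exact h
          show (if ((arr.drop i).take K).length ≠ 0 then
              addRadioGo fa (PySem.List.slice (arr.drop i) (some (0 + (K : Int) + 1)) none) (K : Int) c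
            else c) =
            altGo arr (K : Int) fb ((i : Int) + (K : Int) + 1) c
          rw [if_pos (show ((arr.drop i).take K).length ≠ 0 by rw [hsublen]; omega)]
          have eA : PySem.List.slice (arr.drop i) (some (0 + (K : Int) + 1)) none =
              arr.drop (i + (K + 1)) := by
            have e : 0 + (K : Int) + 1 = ((K + 1 : Nat) : Int) := by push_cast; ring
            rw [e, PySem.List.slice_from_natCast, List.drop_drop]
          have eB : (i : Int) + (K : Int) + 1 = ((i + (K + 1) : Nat) : Int) := by push_cast; ring
          rw [eA, eB]
          exact ih _ (by omega) arr _ _ _ _ _ hk hz rfl (by omega) (by omega)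

-- ===== VERDICT (by name: the statement is the Claim_ definition above) =====
theorem add_radio_spec : Claim_equal_add_radio := by
  intro arr k c _ hpre
  unfold Spec_add_radio add_radio add_radio_alt
  have run : 0 ≤ k → (k = 0 → ∀ x ∈ arr, x ≠ 0) →
      addRadioGo (arr.length + 1) arr k c = altGo arr k (arr.length + 1) 0 c := by
    intro hk hz
    have h := main_loop arr.length arr k c 0 (arr.length + 1) (arr.length + 1)
      hk hz (by simp) (by omega) (by omega)
    simpa using h
  rcases hpre with h | h | ⟨hk0, hall⟩
  · subst h; rfl
  · exact run (by omega) (by intro h0; omega)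
  · exact run (by omega) (fun _ => hall)
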